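-- pv_equiv track=rewrite | github.com/ElAwbery/Python-Practice | Exhaustive enumeration practice/Relative_primes_1ii.py | primePairs
-- ===== SOURCE A (Python) =====
-- from math import gcd
--
-- def primePairs (n):
--
--     low = 2
--     relPrimeList = []
--
--     while low < n:
--         for a in range (low, n+1):
--             if gcd(n, a) == 1:
--                 pair = (a, n)               # make a pair
--                 relPrimeList.append (pair)  # add pair to rel prime list
--         n -= 1
--     return relPrimeList
-- ===== SOURCE B (Python) =====
-- def _marked_non_coprime(n):
--     """Set of all a in [2, n] sharing a factor with n: multiples of n's divisors."""
--     marked = set()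
--     for d in range(2, n + 1):
--         if n % d == 0:
--             marked.update(range(d, n + 1, d))
--     return marked
--
-- def primePairs(n):
--     pairs = []
--     while n > 2:
--         marked = _marked_non_coprime(n)
--         for a in range(2, n + 1):
--             if a not in marked:
--                 pairs.append((a, n))
--         n -= 1
--     return pairs
-- ===== Notes on version B (the rewrite author's own statement) =====
-- stated objective: alternative
-- what changed: Replaces the per-pair gcd test with a per-n sieve-style pass: collect the multiples of n's divisors into a set, then sweep a=2..n keeping unmarked values; outer descending-n loop and pair order preserved.
import Mathlib
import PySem

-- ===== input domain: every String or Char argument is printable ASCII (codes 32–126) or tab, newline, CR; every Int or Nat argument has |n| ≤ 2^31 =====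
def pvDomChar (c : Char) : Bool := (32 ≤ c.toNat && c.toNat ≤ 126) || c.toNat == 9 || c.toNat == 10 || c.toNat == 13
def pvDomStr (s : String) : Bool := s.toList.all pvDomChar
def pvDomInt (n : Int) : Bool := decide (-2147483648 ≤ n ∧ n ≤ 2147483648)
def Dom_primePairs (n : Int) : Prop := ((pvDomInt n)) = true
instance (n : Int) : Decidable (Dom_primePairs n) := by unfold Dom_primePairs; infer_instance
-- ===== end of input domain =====

-- B replaces the per-pair gcd test by a per-n marking pass: it collects the multiples of n's
-- divisors into a set and sweeps the range once, keeping unmarked a (objective: alternative).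

-- ===== PORT A =====
-- while low < n: for a in range(low, n+1): if gcd(n, a) == 1: append (a, n); n -= 1
def primePairsLoopA (n : Int) (acc : List (Int × Int)) : List (Int × Int) :=
  if 2 < n then
    primePairsLoopA (n - 1)
      ((PySem.List.pyRange 2 (n + 1) 1).foldl
        (fun rel a => if Int.gcd n a == 1 then rel ++ [(a, n)] else rel) acc)
  else acc
termination_by n.toNat
decreasing_by omega

def primePairs (n : Int) : List (Int × Int) :=
  primePairsLoopA n []

-- ===== PORT B =====
-- marked = set(); for d in range(2, n+1): if n % d == 0: marked.update(range(d, n+1, d))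
def markedNonCoprime (n : Int) : PySem.Set Int :=
  (PySem.List.pyRange 2 (n + 1) 1).foldl
    (fun s d => if PySem.Int.mod n d == 0 then PySem.Set.update s (PySem.List.pyRange d (n + 1) d) else s)
    PySem.Set.empty

-- while n > 2: marked = _marked_non_coprime(n); for a in range(2, n+1): if a not in marked: append; n -= 1
def primePairsLoopB (n : Int) (pairs : List (Int × Int)) : List (Int × Int) :=
  if 2 < n then
    primePairsLoopB (n - 1)
      ((PySem.List.pyRange 2 (n + 1) 1).foldl
        (fun ps a => if PySem.Set.contains (markedNonCoprime n) a then ps else ps ++ [(a, n)]) pairs)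
  else pairs
termination_by n.toNat
decreasing_by omega

def primePairs_alt (n : Int) : List (Int × Int) :=
  primePairsLoopB n []

-- ===== PRECONDITION & SPEC =====
def Spec_primePairs (n : Int) (out : List (Int × Int)) : Prop := out = primePairs_alt n
instance (n : Int) (out : List (Int × Int)) : Decidable (Spec_primePairs n out) := by unfold Spec_primePairs; infer_instance

-- ===== CLAIM (what is proved, stated in full; the proofs are below) =====
def Claim_equal_primePairs : Prop := ∀ (n : Int), Dom_primePairs n → Spec_primePairs n (primePairs n)

-- ===== LEMMAS AND PROOFS =====

-- membership in a fold of conditional Set.update: union of the updated lists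
lemma mem_foldl_update (l : List Int) (c : Int → Bool) (g : Int → List Int)
    (s : PySem.Set Int) (x : Int) :
    x ∈ l.foldl (fun s d => if c d then PySem.Set.update s (g d) else s) s ↔
      x ∈ s ∨ ∃ d ∈ l, c d ∧ x ∈ g d := by
  induction l generalizing s with
  | nil => simp
  | cons d l ih =>
    simp only [List.foldl_cons, ih]
    by_cases hc : c d
    · simp only [hc, if_true, PySem.Set.mem_update, List.mem_cons]
      constructor
      · rintro ((h | h) | ⟨e, he, hce, hxe⟩)
        · exact Or.inl h
        · exact Or.inr ⟨d, Or.inl rfl, hc, h⟩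
        · exact Or.inr ⟨e, Or.inr he, hce, hxe⟩
      · rintro (h | ⟨e, (rfl | he), hce, hxe⟩)
        · exact Or.inl (Or.inl h)
        · exact Or.inl (Or.inr hxe)
        · exact Or.inr ⟨e, he, hce, hxe⟩
    · simp only [hc, if_false, List.mem_cons, Bool.false_eq_true]
      constructor
      · rintro (h | ⟨e, he, hce, hxe⟩)
        · exact Or.inl h
        · exact Or.inr ⟨e, Or.inr he, hce, hxe⟩
      · rintro (h | ⟨e, (rfl | he), hce, hxe⟩)
        · exact Or.inl h
        · exact absurd hce hc
        · exact Or.inr ⟨e, he, hce, hxe⟩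

lemma mem_marked (n x : Int) :
    x ∈ markedNonCoprime n ↔ ∃ d, 2 ≤ d ∧ d ∣ n ∧ d ∣ x ∧ d ≤ x ∧ x ≤ n := by
  unfold markedNonCoprime
  rw [mem_foldl_update]
  constructor
  · rintro (h | ⟨d, hd, hmod, hx⟩)
    · simp [PySem.Set.empty] at h
    · rw [PySem.List.mem_pyRange_one] at hd
      rw [PySem.List.mem_pyRange_iff_of_pos (by omega)] at hx
      rw [beq_iff_eq, PySem.Int.mod_eq_zero_iff_dvd] at hmod
      have hdx : d ∣ x := by
        have h1 := dvd_add hx.2.2 (dvd_refl d)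
        simpa using h1
      exact ⟨d, by omega, hmod, hdx, by omega, by omega⟩
  · rintro ⟨d, h2, hdn, hdx, hdxle, hxn⟩
    right
    refine ⟨d, ?_, ?_, ?_⟩
    · rw [PySem.List.mem_pyRange_one]; omega
    · rw [beq_iff_eq, PySem.Int.mod_eq_zero_iff_dvd]; exact hdn
    · rw [PySem.List.mem_pyRange_iff_of_pos (by omega)]
      exact ⟨hdxle, by omega, dvd_sub hdx (dvd_refl d)⟩

-- key: within the sweep range, “unmarked” is exactly “coprime to n”
lemma gcd_eq_one_iff_not_marked (n a : Int) (hn : 2 < n) (ha2 : 2 ≤ a) (han : a ≤ n) :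
    Int.gcd n a = 1 ↔ a ∉ markedNonCoprime n := by
  rw [mem_marked]
  constructor
  · rintro hg ⟨d, h2, hdn, hda, _, _⟩
    have hdg : d.toNat ∣ Int.gcd n a := by
      apply Int.dvd_gcd
      · simpa [Int.toNat_of_nonneg (by omega : (0:Int) ≤ d)] using hdn
      · simpa [Int.toNat_of_nonneg (by omega : (0:Int) ≤ d)] using hda
    rw [hg, Nat.dvd_one] at hdg
    omega
  · intro h
    by_contra hg
    apply h
    refine ⟨(Int.gcd n a : Int), ?_, Int.gcd_dvd_left n a, Int.gcd_dvd_right n a, ?_, han⟩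
    · have h0 : Int.gcd n a ≠ 0 := by
        intro h0; rw [Int.gcd_eq_zero_iff] at h0; omega
      omega
    · exact Int.le_of_dvd (by omega) (Int.gcd_dvd_right n a)

-- per-n step: the gcd-filtered append and the unmarked sweep build the same list
lemma step_eq (n : Int) (hn : 2 < n) (acc : List (Int × Int)) :
    (PySem.List.pyRange 2 (n + 1) 1).foldl
        (fun rel a => if Int.gcd n a == 1 then rel ++ [(a, n)] else rel) acc =
      (PySem.List.pyRange 2 (n + 1) 1).foldl
        (fun ps a => if PySem.Set.contains (markedNonCoprime n) a then ps else ps ++ [(a, n)]) acc := by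
  have hfun : (fun (ps : List (Int × Int)) a =>
        if PySem.Set.contains (markedNonCoprime n) a then ps else ps ++ [(a, n)]) =
      (fun ps a => if !PySem.Set.contains (markedNonCoprime n) a then ps ++ [(a, n)] else ps) := by
    funext ps a
    cases PySem.Set.contains (markedNonCoprime n) a <;> simp
  rw [hfun, PySem.List.foldl_append_if, PySem.List.foldl_append_if]
  refine congrArg _ (congrArg _ (List.filter_congr ?_))
  intro a ha
  rw [PySem.List.mem_pyRange_one] at ha
  have hiff := gcd_eq_one_iff_not_marked n a hn (by omega) (by omega)
  rw [← PySem.Set.contains_iff] at hiff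
  cases hc : PySem.Set.contains (markedNonCoprime n) a
  · have hnotm : ¬ PySem.Set.contains (markedNonCoprime n) a = true := by
      rw [hc]; exact Bool.false_ne_true
    have hg := hiff.mpr hnotm
    simp [hg]
  · have hg : ¬ Int.gcd n a = 1 := fun h1 => (hiff.mp h1) hc
    simp [hg]

lemma loops_eq (n : Int) (acc : List (Int × Int)) :
    primePairsLoopA n acc = primePairsLoopB n acc := by
  rw [primePairsLoopA, primePairsLoopB]
  by_cases h : 2 < n
  · simp only [if_pos h]
    rw [step_eq n h acc]
    exact loops_eq (n - 1) _
  · simp [h]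
termination_by n.toNat
decreasing_by omega

-- ===== VERDICT (by name: the statement is the Claim_ definition above) =====
theorem primePairs_spec : Claim_equal_primePairs := by
  intro n _
  unfold Spec_primePairs primePairs primePairs_alt
  exact loops_eq n []
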